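-- pv_equiv track=rewrite | github.com/pypi-data/pypi-mirror-368 | packages/advanced_research/advanced_research-0.1.4.tar.gz/advanced_research-0.1.4/advanced_research/main.py | _add_inline_citations
-- ===== SOURCE A (Python) =====
-- from typing import Any
--
-- def _add_inline_citations(
--     report: str, source_collection: list[dict[str, Any]]
-- ) -> str:
--     """Add inline citations to the report content where appropriate."""
--     if not source_collection:
--         return report
--
--     # Simple approach: add citations at the end of significant statements
--     lines = report.split("\n")
--     cited_lines = []
--     citation_index = 1
--
--     for line in lines:
--         # Add citations to lines that contain factual statements (avoid headers, metadata, etc.)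
--         if (
--             line.strip()
--             and not line.startswith("#")
--             and not line.startswith("*")
--             and not line.startswith("-")
--             and not line.startswith("**")
--             and len(line.strip()) > 50
--             and (
--                 "." in line
--                 or "research" in line.lower()
--                 or "study" in line.lower()
--                 or "data" in line.lower()
--             )
--         ):
--
--             # Add citation if this line doesn't already have one
--             if "[" not in line and citation_index <= len(source_collection):
--                 line = line.rstrip() + f" [{citation_index}]"
--                 citation_index += 1
--
--         cited_lines.append(line)
--
--     return "\n".join(cited_lines)
-- ===== SOURCE B (Python) =====
-- from typing import Any
--
--
-- def _qualifies(line: str) -> bool: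
--     """A line gets a citation slot: substantial prose, not a header/bullet, no bracket yet."""
--     stripped = line.strip()
--     return (
--         bool(stripped)
--         and not line.startswith(("#", "*", "-"))
--         and len(stripped) > 50
--         and ("." in line
--              or any(w in line.lower() for w in ("research", "study", "data")))
--         and "[" not in line
--     )
--
--
-- def _add_inline_citations(
--     report: str, source_collection: list[dict[str, Any]]
-- ) -> str:
--     if not source_collection:
--         return report
--     cap = len(source_collection)
--     lines = report.split("\n")
--     # rank of each line = number of qualifying lines strictly before it
--     ranks = []
--     seen = 0
--     for line in lines:
--         ranks.append(seen)
--         if _qualifies(line):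
--             seen += 1
--     return "\n".join(
--         line.rstrip() + f" [{k + 1}]" if _qualifies(line) and k < cap else line
--         for line, k in zip(lines, ranks)
--     )
-- ===== Notes on version B (the rewrite author's own statement) =====
-- stated objective: alternative
-- what changed: Replaces A's single pass with a mutating running citation counter by a rank-then-cite decomposition: one pass computes each line's rank (number of qualifying lines before it, with the no-'['-yet test folded into the predicate), then a stateless pass cites exactly the lines whose rank is below the number of sources.
import Mathlib
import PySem

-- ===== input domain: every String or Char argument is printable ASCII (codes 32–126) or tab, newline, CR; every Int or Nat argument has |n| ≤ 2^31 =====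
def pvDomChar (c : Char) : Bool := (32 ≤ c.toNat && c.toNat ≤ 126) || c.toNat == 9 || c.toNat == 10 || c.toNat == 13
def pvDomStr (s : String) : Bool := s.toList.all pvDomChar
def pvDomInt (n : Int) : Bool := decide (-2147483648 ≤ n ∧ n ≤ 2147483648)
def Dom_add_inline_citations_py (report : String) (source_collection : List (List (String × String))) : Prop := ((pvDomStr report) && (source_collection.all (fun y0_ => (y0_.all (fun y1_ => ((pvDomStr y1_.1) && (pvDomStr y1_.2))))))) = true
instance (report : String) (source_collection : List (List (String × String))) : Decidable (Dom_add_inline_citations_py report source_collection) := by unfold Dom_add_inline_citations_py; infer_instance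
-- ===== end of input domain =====

-- B replaces A's single running-counter pass by a rank-then-cite decomposition: a first pass
-- assigns each line its rank (number of qualifying lines before it), a second stateless pass
-- cites exactly the lines whose rank is below the number of sources (objective: alternative).

-- ===== PORT A =====
-- A's big qualifying condition, condition by condition ("line.strip()" truthiness = nonempty strip).
def pvACond (line : String) : Bool :=
  decide (0 < PySem.Str.len (PySem.Str.strip line))
  && !(PySem.Str.startswith line "#")
  && !(PySem.Str.startswith line "*")
  && !(PySem.Str.startswith line "-")
  && !(PySem.Str.startswith line "**")
  && decide (50 < PySem.Str.len (PySem.Str.strip line))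
  && (PySem.Str.isIn "." line
      || PySem.Str.isIn "research" (PySem.Str.lower line)
      || PySem.Str.isIn "study" (PySem.Str.lower line)
      || PySem.Str.isIn "data" (PySem.Str.lower line))

-- the loop body: state = (cited_lines, citation_index)
def pvAStep (cap : Nat) (st : List String × Int) (line : String) : List String × Int :=
  if pvACond line then
    if !(PySem.Str.isIn "[" line) && decide (st.2 ≤ (cap : Int)) then
      (st.1 ++ [PySem.Str.rstrip line ++ " [" ++ PySem.Int.toStr st.2 ++ "]"], st.2 + 1)
    else (st.1 ++ [line], st.2)
  else (st.1 ++ [line], st.2)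

-- report.split("\n"): the separator is non-empty, so split? is `some`; getD [] is exact here.
def add_inline_citations_py (report : String) (source_collection : List (List (String × String))) : String :=
  if source_collection.isEmpty then report
  else
    let lines := (PySem.Str.split? report "\n").getD []
    PySem.Str.join "\n" ((lines.foldl (pvAStep source_collection.length) ([], 1)).1)

-- ===== PORT B =====
def pvBQual (line : String) : Bool :=
  decide (0 < PySem.Str.len (PySem.Str.strip line))
  && !(["#", "*", "-"].any (fun p => PySem.Str.startswith line p))
  && decide (50 < PySem.Str.len (PySem.Str.strip line))
  && (PySem.Str.isIn "." line
      || ["research", "study", "data"].any (fun w => PySem.Str.isIn w (PySem.Str.lower line)))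
  && !(PySem.Str.isIn "[" line)

def add_inline_citations_py_alt (report : String) (source_collection : List (List (String × String))) : String :=
  if source_collection.isEmpty then report
  else
    let cap := source_collection.length
    let lines := (PySem.Str.split? report "\n").getD []
    -- first pass: rank of each line = number of qualifying lines strictly before it
    let ranks := (lines.foldl
      (fun (st : List Nat × Nat) line =>
        (st.1 ++ [st.2], if pvBQual line then st.2 + 1 else st.2)) ([], 0)).1
    -- second pass: cite a line iff it qualifies and its rank is below the cap
    PySem.Str.join "\n" ((lines.zip ranks).map (fun p =>
      if pvBQual p.1 && decide (p.2 < cap) then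
        PySem.Str.rstrip p.1 ++ " [" ++ PySem.Int.toStr ((p.2 : Int) + 1) ++ "]"
      else p.1))

-- ===== PRECONDITION & SPEC =====
def Spec_add_inline_citations_py (report : String) (source_collection : List (List (String × String))) (out : String) : Prop := out = add_inline_citations_py_alt report source_collection
instance (report : String) (source_collection : List (List (String × String))) (out : String) : Decidable (Spec_add_inline_citations_py report source_collection out) := by unfold Spec_add_inline_citations_py; infer_instance

-- ===== CLAIM (what is proved, stated in full; the proofs are below) =====
def Claim_equal_add_inline_citations_py : Prop := ∀ (report : String) (source_collection : List (List (String × String))), Dom_add_inline_citations_py report source_collection → Spec_add_inline_citations_py report source_collection (add_inline_citations_py report source_collection)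

-- ===== LEMMAS AND PROOFS =====

-- a line not starting with "*" does not start with "**" (so A's "**" test is redundant)
theorem pv_star2 (l : String) (h : PySem.Str.startswith l "*" = false) :
    PySem.Str.startswith l "**" = false := by
  rw [← Bool.not_eq_true] at *
  intro h2
  apply h
  rw [PySem.Str.startswith_eq, PySem.Chars.startswith_iff] at *
  exact List.IsPrefix.trans (l₁ := ['*']) ⟨['*'], rfl⟩ h2

-- B's predicate is exactly A's big condition together with "no '[' yet"
theorem pv_qual_eq (l : String) :
    pvBQual l = (pvACond l && !(PySem.Str.isIn "[" l)) := by
  rcases hs : PySem.Str.startswith l "*" with _ | _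
  · have h2 := pv_star2 l hs
    simp only [pvACond, pvBQual, hs, h2, List.any_cons, List.any_nil,
      Bool.or_false, Bool.false_or, Bool.not_false, Bool.and_true]
    generalize decide (0 < PySem.Str.len (PySem.Str.strip l)) = a
    generalize PySem.Str.startswith l "#" = bh
    generalize PySem.Str.startswith l "-" = bd
    generalize decide (50 < PySem.Str.len (PySem.Str.strip l)) = bl
    generalize PySem.Str.isIn "." l = e1
    generalize PySem.Str.isIn "research" (PySem.Str.lower l) = e2
    generalize PySem.Str.isIn "study" (PySem.Str.lower l) = e3
    generalize PySem.Str.isIn "data" (PySem.Str.lower l) = e4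
    generalize PySem.Str.isIn "[" l = br
    revert a bh bd bl e1 e2 e3 e4 br
    decide
  · simp only [pvACond, pvBQual, hs, List.any_cons, Bool.or_true, Bool.true_or,
      Bool.not_true, Bool.and_false, Bool.false_and]

-- reference recursion: the output lines, given the rank of the first line
def pvBOut (cap : Nat) : List String → Nat → List String
  | [], _ => []
  | l :: r, c =>
    (if pvBQual l && decide (c < cap) then
        PySem.Str.rstrip l ++ " [" ++ PySem.Int.toStr ((c : Int) + 1) ++ "]"
      else l) :: pvBOut cap r (if pvBQual l then c + 1 else c)

-- the rank list, given the rank of the first line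
def pvRanks : List String → Nat → List Nat
  | [], _ => []
  | l :: r, c => c :: pvRanks r (if pvBQual l then c + 1 else c)

-- A's fold, started with citation_index = 1 + min c cap, produces pvBOut
theorem pv_aloop (cap : Nat) (lines : List String) :
    ∀ (acc : List String) (c : Nat),
      (lines.foldl (pvAStep cap) (acc, 1 + ((min c cap : Nat) : Int))).1
        = acc ++ pvBOut cap lines c := by
  induction lines with
  | nil => intro acc c; simp [pvBOut]
  | cons l r ih =>
    intro acc c
    have hq := pv_qual_eq l
    by_cases hb : pvACond l = true
    · by_cases hbr : PySem.Str.isIn "[" l = true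
      · -- qualifies but already has a bracket: no citation, counter unchanged
        have hq' : pvBQual l = false := by rw [hq, hb, hbr]; rfl
        rw [List.foldl_cons]
        simp only [pvAStep, hb, hbr, if_true, Bool.not_true, Bool.false_and,
          Bool.false_eq_true, if_false]
        rw [ih (acc ++ [l]) c]
        simp [pvBOut, hq', List.append_assoc]
      · have hbr' : PySem.Str.isIn "[" l = false := by simpa using hbr
        have hq' : pvBQual l = true := by rw [hq, hb, hbr']; rfl
        by_cases hc : c < cap
        · -- cited: counter = c + 1 consumed, rank advances
          have hm : min c cap = c := by omega
          rw [List.foldl_cons]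
          simp only [pvAStep, hb, hbr', if_true, Bool.not_false, Bool.true_and]
          rw [if_pos (by simp; omega)]
          have e1 : (1 + ((min c cap : Nat) : Int)) = ((c : Nat) : Int) + 1 := by
            rw [hm]; omega
          have e2 : (1 + ((min c cap : Nat) : Int)) + 1
              = 1 + ((min (c + 1) cap : Nat) : Int) := by
            have : min (c + 1) cap = c + 1 := by omega
            rw [hm, this]; push_cast; ring
          rw [e2, ih _ (c + 1)]
          simp only [pvBOut, hq', hc, decide_true, Bool.true_and, if_pos]
          rw [e1]
          simp
        · -- qualifies, bracket-free, but the sources are exhausted: rank advances, counter capped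
          have hm : min c cap = cap := by omega
          rw [List.foldl_cons]
          simp only [pvAStep, hb, hbr', if_true, Bool.not_false, Bool.true_and]
          rw [if_neg (by simp; omega)]
          have e2 : (1 + ((min c cap : Nat) : Int)) = 1 + ((min (c + 1) cap : Nat) : Int) := by
            have : min (c + 1) cap = cap := by omega
            rw [hm, this]
          rw [e2, ih _ (c + 1)]
          simp only [pvBOut, hq', hc, decide_false, Bool.and_false, if_true,
            Bool.false_eq_true, if_false]
          simp
    · -- does not qualify: emitted unchanged, nothing advances
      have hb' : pvACond l = false := by simpa using hb
      have hq' : pvBQual l = false := by rw [hq, hb']; rfl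
      rw [List.foldl_cons]
      simp only [pvAStep, hb', Bool.false_eq_true, if_false]
      rw [ih (acc ++ [l]) c]
      simp [pvBOut, hq', List.append_assoc]

-- B's first pass produces pvRanks
theorem pv_rloop (lines : List String) :
    ∀ (acc : List Nat) (c : Nat),
      (lines.foldl
        (fun (st : List Nat × Nat) line =>
          (st.1 ++ [st.2], if pvBQual line then st.2 + 1 else st.2)) (acc, c)).1
        = acc ++ pvRanks lines c := by
  induction lines with
  | nil => intro acc c; simp [pvRanks]
  | cons l r ih =>
    intro acc c
    rw [List.foldl_cons, ih (acc ++ [c]) _]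
    simp [pvRanks, List.append_assoc]

-- B's second pass over (line, rank) pairs is pvBOut
theorem pv_zip (cap : Nat) (lines : List String) :
    ∀ (c : Nat),
      ((lines.zip (pvRanks lines c)).map (fun p =>
        if pvBQual p.1 && decide (p.2 < cap) then
          PySem.Str.rstrip p.1 ++ " [" ++ PySem.Int.toStr ((p.2 : Int) + 1) ++ "]"
        else p.1))
        = pvBOut cap lines c := by
  induction lines with
  | nil => intro c; simp [pvRanks, pvBOut]
  | cons l r ih =>
    intro c
    simp only [pvRanks, List.zip_cons_cons, List.map_cons, pvBOut, ih]

-- ===== VERDICT (by name: the statement is the Claim_ definition above) =====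
theorem add_inline_citations_py_spec : Claim_equal_add_inline_citations_py := by
  unfold Claim_equal_add_inline_citations_py
  intro report sc _
  unfold Spec_add_inline_citations_py add_inline_citations_py add_inline_citations_py_alt
  by_cases h : sc.isEmpty
  · simp [h]
  · simp only [h, if_false, Bool.false_eq_true]
    have hA : ∀ lines : List String,
        (lines.foldl (pvAStep sc.length) ([], 1)).1 = pvBOut sc.length lines 0 := by
      intro lines
      have := pv_aloop sc.length lines [] 0
      simpa using this
    rw [hA, pv_rloop _ [] 0, List.nil_append, pv_zip sc.length _ 0]
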